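-- pv_equiv track=rewrite | github.com/Klumpe-lab/crboost_server | ui/pipeline_builder/io_config_component.py | _looks_like_filename
-- ===== SOURCE A (Python) =====
-- def _looks_like_filename(s: str) -> bool:
--     s = s.lower()
--     return any(
--         s.endswith(ext)
--         for ext in (
--             ".star",
--             ".mrc",
--             ".mrcs",
--             ".eer",
--             ".tif",
--             ".tiff",
--             ".png",
--             ".jpg",
--             ".jpeg",
--             ".txt",
--             ".log",
--             ".json",
--             ".yaml",
--             ".yml",
--             ".mdoc",
--             ".aln",
--             ".tlt",
--         )
--     )
-- ===== SOURCE B (Python) =====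
-- _FILENAME_EXTS = frozenset((
--     ".star", ".mrc", ".mrcs", ".eer", ".tif", ".tiff", ".png", ".jpg",
--     ".jpeg", ".txt", ".log", ".json", ".yaml", ".yml", ".mdoc", ".aln", ".tlt",
-- ))
--
--
-- def _looks_like_filename(s: str) -> bool:
--     s = s.lower()
--     i = s.rfind(".")
--     if i == -1:
--         return False
--     return s[i:] in _FILENAME_EXTS
-- ===== Notes on version B (the rewrite author's own statement) =====
-- stated objective: idiomatic
-- what changed: Instead of testing the string against each of the 17 extensions with endswith, B extracts the suffix from the last dot once (rfind + slice) and does a single frozenset membership lookup.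
import Mathlib
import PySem

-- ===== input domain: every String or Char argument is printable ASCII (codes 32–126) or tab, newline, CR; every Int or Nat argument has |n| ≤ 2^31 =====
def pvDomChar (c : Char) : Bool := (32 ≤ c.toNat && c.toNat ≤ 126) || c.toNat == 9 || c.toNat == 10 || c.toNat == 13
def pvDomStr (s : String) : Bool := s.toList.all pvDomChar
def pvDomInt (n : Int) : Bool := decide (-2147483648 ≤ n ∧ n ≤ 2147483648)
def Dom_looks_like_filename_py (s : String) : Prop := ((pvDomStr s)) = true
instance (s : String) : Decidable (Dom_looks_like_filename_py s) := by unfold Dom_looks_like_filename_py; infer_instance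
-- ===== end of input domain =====

-- B replaces A's per-extension endswith loop by one rfind('.') + slice + set-membership lookup (idiomatic).

-- ===== PORT A =====
def looks_like_filename_py (s : String) : Bool :=
  let t := PySem.Str.lower s
  [".star", ".mrc", ".mrcs", ".eer", ".tif", ".tiff", ".png", ".jpg", ".jpeg",
   ".txt", ".log", ".json", ".yaml", ".yml", ".mdoc", ".aln", ".tlt"].any
    (fun ext => PySem.Str.endswith t ext)

-- ===== PORT B =====
def pvFilenameExts : PySem.Set String :=
  PySem.Set.ofList
    [".star", ".mrc", ".mrcs", ".eer", ".tif", ".tiff", ".png", ".jpg", ".jpeg",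
     ".txt", ".log", ".json", ".yaml", ".yml", ".mdoc", ".aln", ".tlt"]

def looks_like_filename_py_alt (s : String) : Bool :=
  let t := PySem.Str.lower s
  let i := PySem.Str.rfind t "."
  if i = -1 then false
  else pvFilenameExts.contains (PySem.Str.slice t (some i) none)

-- ===== PRECONDITION & SPEC =====
def Spec_looks_like_filename_py (s : String) (out : Bool) : Prop := out = looks_like_filename_py_alt s
instance (s : String) (out : Bool) : Decidable (Spec_looks_like_filename_py s out) := by unfold Spec_looks_like_filename_py; infer_instance

-- ===== CLAIM (what is proved, stated in full; the proofs are below) =====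
def Claim_equal_looks_like_filename_py : Prop := ∀ (s : String), Dom_looks_like_filename_py s → Spec_looks_like_filename_py s (looks_like_filename_py s)

-- ===== LEMMAS AND PROOFS =====

theorem pv_prefix_dot (l : List Char) : ['.'].isPrefixOf l = true ↔ l[0]? = some '.' := by
  rw [List.isPrefixOf_iff_prefix]
  cases l with
  | nil => simp
  | cons a t => simp [List.cons_prefix_cons, eq_comm]

theorem pv_go_eq_of_dot (cs : List Char) (d k : Nat) (hd : d ≤ k)
    (hp : cs[d]? = some '.')
    (hno : ∀ i : Nat, d < i → i ≤ k → cs[i]? ≠ some '.') :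
    PySem.Chars.rfind.go cs ['.'] k = (d : Int) := by
  induction k with
  | zero =>
    have hd0 : d = 0 := by omega
    subst hd0
    simp only [PySem.Chars.rfind.go]
    rw [if_pos (pv_prefix_dot cs |>.mpr hp)]
    simp
  | succ k ih =>
    by_cases h : d = k + 1
    · subst h
      have hh : (cs.drop (k + 1))[0]? = some '.' := by
        rw [List.getElem?_drop]; simpa using hp
      simp only [PySem.Chars.rfind.go]
      rw [if_pos (pv_prefix_dot _ |>.mpr hh)]
    · have hdk : d ≤ k := by omega
      have hne : cs[k + 1]? ≠ some '.' := hno (k + 1) (by omega) (le_refl _)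
      have hcond : ¬ (['.'].isPrefixOf (cs.drop (k + 1)) = true) := by
        rw [pv_prefix_dot, List.getElem?_drop]
        simpa using hne
      simp only [PySem.Chars.rfind.go]
      rw [if_neg hcond]
      exact ih hdk (fun i h1 h2 => hno i h1 (by omega))

theorem pv_rfind_of_suffix (cs r : List Char) (hr : '.' ∉ r) (hsuf : ('.' :: r) <:+ cs) :
    PySem.Chars.rfind cs ['.'] = ((cs.length - ('.' :: r).length : Nat) : Int) ∧
    cs.drop (cs.length - ('.' :: r).length) = '.' :: r := by
  obtain ⟨p, rfl⟩ := hsuf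
  have hlen : (p ++ '.' :: r).length - ('.' :: r).length = p.length := by simp
  rw [hlen]
  refine ⟨?_, List.drop_left⟩
  show PySem.Chars.rfind.go (p ++ '.' :: r) ['.'] (p ++ '.' :: r).length = (p.length : Int)
  apply pv_go_eq_of_dot _ p.length _ (by simp)
  · rw [List.getElem?_append_right (le_refl _)]
    simp
  · intro i hi hile
    rw [List.getElem?_append_right (by omega)]
    obtain ⟨j, hj⟩ : ∃ j, i - p.length = j + 1 := ⟨i - p.length - 1, by omega⟩
    rw [hj, List.getElem?_cons_succ]
    intro hc
    exact hr (List.mem_of_getElem? hc)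

theorem pv_main (t : String) :
    ([".star", ".mrc", ".mrcs", ".eer", ".tif", ".tiff", ".png", ".jpg", ".jpeg",
      ".txt", ".log", ".json", ".yaml", ".yml", ".mdoc", ".aln", ".tlt"].any
        (fun ext => PySem.Str.endswith t ext)) =
    (if PySem.Str.rfind t "." = -1 then false
     else pvFilenameExts.contains (PySem.Str.slice t (some (PySem.Str.rfind t ".")) none)) := by
  cases hA : ([".star", ".mrc", ".mrcs", ".eer", ".tif", ".tiff", ".png", ".jpg", ".jpeg",
      ".txt", ".log", ".json", ".yaml", ".yml", ".mdoc", ".aln", ".tlt"].any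
        (fun ext => PySem.Str.endswith t ext)) with
  | false =>
    rw [List.any_eq_false] at hA
    split
    · rfl
    · next h =>
      symm
      rw [Bool.eq_false_iff]
      intro hcon
      have hmem : PySem.Str.slice t (some (PySem.Str.rfind t ".")) none ∈
          ([".star", ".mrc", ".mrcs", ".eer", ".tif", ".tiff", ".png", ".jpg", ".jpeg",
            ".txt", ".log", ".json", ".yaml", ".yml", ".mdoc", ".aln", ".tlt"] : List String) := by
        have := List.contains_iff_mem.mp hcon
        simpa [pvFilenameExts, PySem.Set.mem_ofList] using this
      apply hA _ hmem
      have hlist : (PySem.Str.slice t (some (PySem.Str.rfind t ".")) none).toList =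
          t.toList.drop (PySem.List.clampIdx t.toList.length (PySem.Str.rfind t ".")) := by
        simp [PySem.List.slice_some_none]
      simp only [PySem.Str.endswith_eq]
      rw [PySem.Chars.endswith_iff, hlist]
      exact List.drop_suffix _ _
  | true =>
    rw [List.any_eq_true] at hA
    obtain ⟨ext, hmem, hend⟩ := hA
    have hprop : ∀ x ∈ ([".star", ".mrc", ".mrcs", ".eer", ".tif", ".tiff", ".png", ".jpg", ".jpeg",
        ".txt", ".log", ".json", ".yaml", ".yml", ".mdoc", ".aln", ".tlt"] : List String),
        x.toList.head? = some '.' ∧ '.' ∉ x.toList.tail := by decide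
    obtain ⟨hhead, htail⟩ := hprop ext hmem
    have hext : ext.toList = '.' :: ext.toList.tail := by
      cases hx : ext.toList with
      | nil => rw [hx] at hhead; simp at hhead
      | cons c cs => rw [hx] at hhead; simp at hhead; simp [hhead]
    have hsuf : ('.' :: ext.toList.tail) <:+ t.toList := by
      rw [← hext]
      rw [PySem.Str.endswith_eq] at hend
      exact (PySem.Chars.endswith_iff _ _).mp hend
    obtain ⟨hrf, hdrop⟩ := pv_rfind_of_suffix t.toList ext.toList.tail htail hsuf
    set d : Nat := t.toList.length - ('.' :: ext.toList.tail).length with hd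
    have hrf' : PySem.Str.rfind t "." = (d : Int) := by
      rw [PySem.Str.rfind_eq]
      simpa using hrf
    rw [hrf', if_neg (show ¬((d : Int) = -1) by omega)]
    have hslice : (PySem.Str.slice t (some (d : Int)) none).toList = ext.toList := by
      rw [PySem.Str.toList_slice]
      simp only [PySem.Chars.slice_eq_listSlice, PySem.List.slice_from_natCast]
      rw [hdrop, ← hext]
    have hstr : PySem.Str.slice t (some (d : Int)) none = ext := by
      rw [← String.ofList_toList (s := PySem.Str.slice t (some (d : Int)) none), hslice,
        String.ofList_toList]
    rw [hstr]
    symm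
    exact List.contains_iff_mem.mpr (by simpa [pvFilenameExts, PySem.Set.mem_ofList] using hmem)

-- ===== VERDICT (by name: the statement is the Claim_ definition above) =====
theorem looks_like_filename_py_spec : Claim_equal_looks_like_filename_py := by
  intro s _
  show looks_like_filename_py s = looks_like_filename_py_alt s
  unfold looks_like_filename_py looks_like_filename_py_alt
  exact pv_main (PySem.Str.lower s)
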